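-- pv_equiv track=rewrite | github.com/linsomniac/a2logviz | a2logviz/log_parser.py | _is_logformat_string
-- ===== SOURCE A (Python) =====
-- def _is_logformat_string(format_str: str) -> bool:
--     """Check if the format string looks like an Apache LogFormat string."""
--     # Apache LogFormat strings typically contain % directives
--     return "%" in format_str and any(
--         directive in format_str
--         for directive in [
--             "%h",
--             "%l",
--             "%u",
--             "%t",
--             "%r",
--             "%s",
--             "%O",
--             "%i",
--             "%v",
--             "%p",
--             "%D",
--             "%T",
--         ]
--     )
-- ===== SOURCE B (Python) =====
-- def _is_logformat_string(format_str: str) -> bool: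
--     """Check if the format string looks like an Apache LogFormat string."""
--     directives = {"h", "l", "u", "t", "r", "s", "O", "i", "v", "p", "D", "T"}
--     prev_percent = False
--     for ch in format_str:
--         if prev_percent and ch in directives:
--             return True
--         prev_percent = ch == "%"
--     return False
-- ===== Notes on version B (the rewrite author's own statement) =====
-- stated objective: alternative
-- what changed: Replaces twelve independent whole-string substring scans (plus a redundant percent-containment check) by a single left-to-right pass carrying a previous-char-was-percent flag and testing the next character against a set of directive letters.
import Mathlib
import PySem

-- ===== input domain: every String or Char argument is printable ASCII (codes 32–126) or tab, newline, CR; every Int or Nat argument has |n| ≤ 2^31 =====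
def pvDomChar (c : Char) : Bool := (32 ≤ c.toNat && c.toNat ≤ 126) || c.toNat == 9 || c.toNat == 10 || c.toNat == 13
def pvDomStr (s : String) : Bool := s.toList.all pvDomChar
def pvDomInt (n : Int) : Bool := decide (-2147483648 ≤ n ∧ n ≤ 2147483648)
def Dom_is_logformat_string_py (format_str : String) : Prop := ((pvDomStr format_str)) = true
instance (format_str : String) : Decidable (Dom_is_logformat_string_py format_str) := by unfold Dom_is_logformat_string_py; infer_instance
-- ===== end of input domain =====

-- B replaces A's twelve whole-string substring scans by one left-to-right pass with a
-- previous-char-was-percent flag and a set of directive letters (objective: alternative single-pass algorithm).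

-- ===== PORT A =====
def is_logformat_string_py (format_str : String) : Bool :=
  PySem.Str.isIn "%" format_str &&
    (["%h", "%l", "%u", "%t", "%r", "%s", "%O", "%i", "%v", "%p", "%D", "%T"].any
      (fun directive => PySem.Str.isIn directive format_str))

-- ===== PORT B =====
-- the set of directive second-characters (a Python set of chars → PySem.Set Char = distinct list)
def pvDirectives : List Char := ['h', 'l', 'u', 't', 'r', 's', 'O', 'i', 'v', 'p', 'D', 'T']

-- the for-loop over the characters, carrying prev_percent
def pvScan : Bool → List Char → Bool
  | _, [] => false
  | prev, ch :: rest =>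
    if prev && pvDirectives.contains ch then true
    else pvScan (ch == '%') rest

def is_logformat_string_py_alt (format_str : String) : Bool :=
  pvScan false format_str.toList

-- ===== PRECONDITION & SPEC =====
def Spec_is_logformat_string_py (format_str : String) (out : Bool) : Prop := out = is_logformat_string_py_alt format_str
instance (format_str : String) (out : Bool) : Decidable (Spec_is_logformat_string_py format_str out) := by unfold Spec_is_logformat_string_py; infer_instance

-- ===== CLAIM (what is proved, stated in full; the proofs are below) =====
def Claim_equal_is_logformat_string_py : Prop := ∀ (format_str : String), Dom_is_logformat_string_py format_str → Spec_is_logformat_string_py format_str (is_logformat_string_py format_str)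

-- ===== LEMMAS AND PROOFS =====

lemma singleton_prefix_iff (c : Char) (l : List Char) : [c] <+: l ↔ l.head? = some c := by
  cases l with
  | nil => simp
  | cons a t => simp [List.cons_prefix_cons, eq_comm]

lemma pair_infix_cons (c a : Char) (l : List Char) :
    ['%', c] <:+: a :: l ↔ (a = '%' ∧ l.head? = some c) ∨ ['%', c] <:+: l := by
  rw [List.infix_cons_iff, List.cons_prefix_cons, singleton_prefix_iff, eq_comm]

lemma pvScan_true_iff (l : List Char) : ∀ prev : Bool,
    pvScan prev l = true ↔
      (prev = true ∧ ∃ c, l.head? = some c ∧ c ∈ pvDirectives) ∨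
      ∃ c ∈ pvDirectives, ['%', c] <:+: l := by
  induction l with
  | nil =>
    intro prev
    simp [pvScan]
  | cons a t ih =>
    intro prev
    by_cases h : prev = true ∧ a ∈ pvDirectives
    · simp [pvScan, h.1, h.2]
    · have hstep : pvScan prev (a :: t) = pvScan (a == '%') t := by
        by_cases hm : a ∈ pvDirectives
        · have hp : prev = false := by
            cases prev
            · rfl
            · exact absurd ⟨rfl, hm⟩ h
          simp [pvScan, hp]
        · simp [pvScan, hm]
      rw [hstep, ih]
      constructor
      · rintro (⟨hp, c, hc, hm⟩ | ⟨c, hm, hi⟩)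
        · exact Or.inr ⟨c, hm, (pair_infix_cons c a t).mpr (Or.inl ⟨by simpa using hp, hc⟩)⟩
        · exact Or.inr ⟨c, hm, (pair_infix_cons c a t).mpr (Or.inr hi)⟩
      · rintro (⟨hp, c, hc, hm⟩ | ⟨c, hm, hi⟩)
        · exact absurd ⟨hp, by simp at hc; exact hc ▸ hm⟩ h
        · rcases (pair_infix_cons c a t).mp hi with ⟨ha, hc⟩ | hi'
          · exact Or.inl ⟨by simp [ha], c, hc, hm⟩
          · exact Or.inr ⟨c, hm, hi'⟩

lemma pair_infix_percent {c : Char} {l : List Char} (h : ['%', c] <:+: l) : ['%'] <:+: l :=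
  List.IsInfix.trans (List.IsPrefix.isInfix (by simp)) h

lemma portA_true_iff (s : String) :
    is_logformat_string_py s = true ↔ ∃ c ∈ pvDirectives, ['%', c] <:+: s.toList := by
  simp only [is_logformat_string_py, Bool.and_eq_true, List.any_eq_true, List.mem_cons,
    List.not_mem_nil, or_false, PySem.Str.isIn_iff_infix]
  constructor
  · rintro ⟨-, d, hd, hi⟩
    rcases hd with h | h | h | h | h | h | h | h | h | h | h | h <;>
      · subst h
        exact ⟨_, by decide, hi⟩
  · rintro ⟨c, hc, hi⟩
    refine ⟨pair_infix_percent hi, ?_⟩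
    fin_cases hc <;>
      first
      | exact ⟨"%h", by simp, hi⟩ | exact ⟨"%l", by simp, hi⟩ | exact ⟨"%u", by simp, hi⟩
      | exact ⟨"%t", by simp, hi⟩ | exact ⟨"%r", by simp, hi⟩ | exact ⟨"%s", by simp, hi⟩
      | exact ⟨"%O", by simp, hi⟩ | exact ⟨"%i", by simp, hi⟩ | exact ⟨"%v", by simp, hi⟩
      | exact ⟨"%p", by simp, hi⟩ | exact ⟨"%D", by simp, hi⟩ | exact ⟨"%T", by simp, hi⟩

-- ===== VERDICT (by name: the statement is the Claim_ definition above) =====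
theorem is_logformat_string_py_spec : Claim_equal_is_logformat_string_py := by
  intro s _
  unfold Spec_is_logformat_string_py
  rw [Bool.eq_iff_iff, portA_true_iff, is_logformat_string_py_alt, pvScan_true_iff]
  simp
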